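-- pv_equiv track=rewrite | github.com/intel/HBFA-FL | HBFA/UefiHostTestTools/RunLibFuzzer.py | checkSanitizers
-- ===== SOURCE A (Python) =====
-- def checkSanitizers(Sanitizers):
--     CheckList = Sanitizers.split(',')
--     CheckedSanitizers = ''
--     SupportedSanitizers = ('address', 'memory', 'undefined',
--                            'integer', 'bounds', 'enum', 'function')
--     AddressMemoryCheck = {"address": False, "memory": False}
--     for Sanitizer in CheckList:
--         if Sanitizer in SupportedSanitizers:
--             CheckedSanitizers += (',' + Sanitizer)
--         else:
--             return "[!] Unsupported sanitizer provided in option -s: [ %s ]" \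
--                 % (Sanitizer)
--         if Sanitizer == 'address' or Sanitizer == 'memory':
--             AddressMemoryCheck[Sanitizer] = True
--     if (AddressMemoryCheck['address'] is True) and \
--        (AddressMemoryCheck['memory'] is True):
--         return "[!] Unsupported combination of 'address' (ASAN) and 'memory'" \
--                " (MSAN) for option '-s'."
--     return CheckedSanitizers
-- ===== SOURCE B (Python) =====
-- def checkSanitizers(Sanitizers):
--     SupportedSanitizers = frozenset({'address', 'memory', 'undefined',
--                                      'integer', 'bounds', 'enum', 'function'})
--
--     def build(tokens):
--         # recursively assemble ',tok1,tok2,...'; signal the first bad token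
--         if not tokens:
--             return ''
--         if tokens[0] not in SupportedSanitizers:
--             raise ValueError(tokens[0])
--         return ',' + tokens[0] + build(tokens[1:])
--
--     CheckList = Sanitizers.split(',')
--     try:
--         Out = build(CheckList)
--     except ValueError as e:
--         return "[!] Unsupported sanitizer provided in option -s: [ %s ]" \
--             % (e.args[0])
--     if {'address', 'memory'} <= set(CheckList):
--         return "[!] Unsupported combination of 'address' (ASAN) and 'memory'" \
--                " (MSAN) for option '-s'."
--     return Out
-- ===== Notes on version B (the rewrite author's own statement) =====
-- stated objective: alternative
-- what changed: Replaces A's fused iterative loop (growing accumulator string + address/memory flag dict, combo checked after the loop) with a recursive decomposition: a recursive helper assembles the output back from the tail and signals the first unsupported token by raising ValueError (caught at the top), and the forbidden combo is detected by frozenset subset algebra {'address','memory'} <= set(CheckList) instead of flag tracking.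
import Mathlib
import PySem

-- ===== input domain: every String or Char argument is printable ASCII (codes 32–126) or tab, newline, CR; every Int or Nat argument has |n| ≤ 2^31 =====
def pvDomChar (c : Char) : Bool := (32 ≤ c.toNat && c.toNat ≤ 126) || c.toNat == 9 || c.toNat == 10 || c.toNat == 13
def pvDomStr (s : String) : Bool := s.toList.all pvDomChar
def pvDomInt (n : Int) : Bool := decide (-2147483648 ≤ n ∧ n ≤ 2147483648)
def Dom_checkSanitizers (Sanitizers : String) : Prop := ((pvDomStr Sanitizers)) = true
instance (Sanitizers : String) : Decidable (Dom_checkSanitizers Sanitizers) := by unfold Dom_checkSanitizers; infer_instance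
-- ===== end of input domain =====

-- B replaces A's fused loop (accumulator string + flag dict) with a recursive builder that
-- raises on the first bad token and a set-subset combo test; same return value everywhere.

-- shared constants of both Pythons
def pvSupported : List (List Char) :=
  ["address".toList, "memory".toList, "undefined".toList,
   "integer".toList, "bounds".toList, "enum".toList, "function".toList]

def pvUnsuppErr (s : List Char) : String :=
  String.ofList ("[!] Unsupported sanitizer provided in option -s: [ ".toList ++ s ++ " ]".toList)

def pvComboErr : String :=
  "[!] Unsupported combination of 'address' (ASAN) and 'memory' (MSAN) for option '-s'."

-- ===== PORT A =====
-- A's loop: accumulator string (as List Char) + the AddressMemoryCheck dict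
def checkSanitizersLoop : List (List Char) → List Char → PySem.Dict (List Char) Bool → String
  | [], acc, d =>
      if d.getD "address".toList false && d.getD "memory".toList false then pvComboErr
      else String.ofList acc
  | s :: rest, acc, d =>
      if pvSupported.contains s then
        checkSanitizersLoop rest (acc ++ ',' :: s)
          (if s == "address".toList || s == "memory".toList then d.insert s true else d)
      else pvUnsuppErr s

def checkSanitizers (Sanitizers : String) : String :=
  checkSanitizersLoop (PySem.Chars.splitOn Sanitizers.toList [',']) []
    (PySem.Dict.ofList [("address".toList, false), ("memory".toList, false)])

-- ===== PORT B =====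
-- B's frozenset of supported names
def pvSupportedSet : PySem.Set (List Char) := PySem.Set.ofList pvSupported

-- B's recursive `build`: ValueError modelled as Except.error carrying the bad token
def pvBuild : List (List Char) → Except (List Char) (List Char)
  | [] => .ok []
  | s :: rest =>
      if pvSupportedSet.contains s then
        match pvBuild rest with
        | .ok t => .ok (',' :: s ++ t)
        | .error e => .error e
      else .error s

def checkSanitizers_alt (Sanitizers : String) : String :=
  match pvBuild (PySem.Chars.splitOn Sanitizers.toList [',']) with
  | .error e => pvUnsuppErr e
  | .ok out =>
      if PySem.Set.issubset (PySem.Set.ofList ["address".toList, "memory".toList])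
          (PySem.Set.ofList (PySem.Chars.splitOn Sanitizers.toList [','])) then pvComboErr
      else String.ofList out

-- ===== PRECONDITION & SPEC =====
def Spec_checkSanitizers (Sanitizers : String) (out : String) : Prop := out = checkSanitizers_alt Sanitizers
instance (Sanitizers : String) (out : String) : Decidable (Spec_checkSanitizers Sanitizers out) := by unfold Spec_checkSanitizers; infer_instance

-- ===== CLAIM (what is proved, stated in full; the proofs are below) =====
def Claim_equal_checkSanitizers : Prop := ∀ (Sanitizers : String), Dom_checkSanitizers Sanitizers → Spec_checkSanitizers Sanitizers (checkSanitizers Sanitizers)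

-- ===== LEMMAS AND PROOFS =====

-- characterisation of A's loop
lemma loop_eq (l : List (List Char)) (acc : List Char) (d : PySem.Dict (List Char) Bool) :
    checkSanitizersLoop l acc d =
      match l.find? (fun s => !pvSupported.contains s) with
      | some s => pvUnsuppErr s
      | none =>
          if (d.getD "address".toList false || l.contains "address".toList) &&
             (d.getD "memory".toList false || l.contains "memory".toList) then pvComboErr
          else String.ofList (acc ++ (l.map (fun s => ',' :: s)).flatten) := by
  induction l generalizing acc d with
  | nil => simp [checkSanitizersLoop]
  | cons s rest ih =>
    by_cases hs : pvSupported.contains s = true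
    · have hs' : s ∈ pvSupported := by simpa using hs
      simp only [checkSanitizersLoop, hs, List.find?_cons, Bool.not_true,
        List.contains_cons, ih]
      cases h : rest.find? (fun s => !pvSupported.contains s) with
      | some t => simp
      | none =>
        simp only []
        by_cases ha : s = "address".toList
        · subst ha
          simp [PySem.Dict.getD_insert, List.append_assoc]
        · by_cases hm : s = "memory".toList
          · subst hm
            simp_all [PySem.Dict.getD_insert, List.append_assoc]
          · have : ¬ (s = "address".toList ∨ s = "memory".toList) := by tauto
            simp_all [List.append_assoc, eq_comm (a := s)]
    · have hs' : s ∉ pvSupported := by simpa using hs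
      simp [checkSanitizersLoop, hs']

-- characterisation of B's recursive builder
lemma build_eq (l : List (List Char)) :
    pvBuild l =
      match l.find? (fun s => !pvSupported.contains s) with
      | some s => Except.error s
      | none => Except.ok (l.map (fun s => ',' :: s)).flatten := by
  have hset : pvSupportedSet = pvSupported := by decide
  induction l with
  | nil => simp [pvBuild]
  | cons s rest ih =>
    by_cases hs : s ∈ pvSupported
    · simp only [pvBuild, hset, hs, if_true, ih, List.find?_cons]
      cases h : rest.find? (fun s => !pvSupported.contains s) <;> simp_all
    · simp [pvBuild, hset, hs, List.find?_cons]

-- the set-subset combo test is the pair of membership tests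
lemma subset_am (l : List (List Char)) :
    PySem.Set.issubset (PySem.Set.ofList ["address".toList, "memory".toList])
        (PySem.Set.ofList l)
      = (l.contains "address".toList && l.contains "memory".toList) := by
  rw [Bool.eq_iff_iff, PySem.Set.issubset_iff]
  simp only [PySem.Set.mem_ofList, Bool.and_eq_true, List.contains_eq_mem,
    decide_eq_true_eq, List.mem_cons, List.not_mem_nil, or_false]
  constructor
  · intro h
    exact ⟨h _ (Or.inl rfl), h _ (Or.inr rfl)⟩
  · rintro ⟨h1, h2⟩ x hx
    rcases hx with rfl | rfl <;> assumption

-- ===== VERDICT (by name: the statement is the Claim_ definition above) =====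
theorem checkSanitizers_spec : Claim_equal_checkSanitizers := by
  intro S _
  unfold Spec_checkSanitizers checkSanitizers checkSanitizers_alt
  rw [loop_eq, build_eq, subset_am]
  have ha : (PySem.Dict.ofList [(['a','d','d','r','e','s','s'], (false : Bool)),
      (['m','e','m','o','r','y'], false)]).getD ['a','d','d','r','e','s','s'] false = false := by decide
  have hm : (PySem.Dict.ofList [(['a','d','d','r','e','s','s'], (false : Bool)),
      (['m','e','m','o','r','y'], false)]).getD ['m','e','m','o','r','y'] false = false := by decide
  cases h : (PySem.Chars.splitOn S.toList [',']).find? (fun s => !pvSupported.contains s) with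
  | some t => simp only [h]
  | none =>
    simp only [h]
    simp [ha, hm]
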